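-- pv_equiv track=rewrite | github.com/mailysls/Projects | PMI_Jupyter(2).py | traversee_carre
-- ===== SOURCE A (Python) =====
-- def un_trajet_carre(x0,l,Xm,Ym):
--     explosion=l # Explosion est la variable qui stocke le distance à laquelle le lapin meurt : elle est initialisée à l puis décroit si une mine est placée sur le chemin du lapin.
--     for i in range (len(Xm)):  # On fait une boucle sur chaque centimètre de la largeur du terrain.
--         if Xm[i]-5<=x0 and Xm[i]+5>=x0: # On teste sur l'abscisse de la mine...
--             if Ym[i]<explosion : # ...puis sur son ordonnée.
--                 explosion = Ym[i] # S'il y a une bombe sur le chemin, explosion prend la valeur de l'ordonnée de la bombe.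
--     if explosion != l:
--         if explosion-5<0: # On prend en compte la largeur de la mine.
--             return(1)
--         else :
--             return(explosion-5)
--     else :
--         return(l)
--
-- def traversee_carre(Xm,Ym,l,L,N0,position):
--     N=[N0]
--     d=[0]
--     morts=[0]*(l+1) # morts[i]=nombre de lapins qui meurent en y=i.
--     for i in range (len(position)):# On parcourt la liste des lapins.
--         y= un_trajet_carre(position[i],l,Xm,Ym) # On calcule la distance à laquelle le i-ème lapin meurt ainsi que les coordonnées de la bombe qui l'a fait exploser.
--         morts[y]=morts[y]+1 # On rajoute 1 à la l'élément de la liste morts comptant le nombre de lapins morts en y.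
--     for i in range (l):
--         N.append(N[-1]-morts[i])
--         d.append(i+1)
--     return(N,d)
-- ===== SOURCE B (Python) =====
-- def traversee_carre(Xm, Ym, l, L, N0, position):
--     # Bucket mines by x once: min Ym per x-coordinate.  A rabbit at p is only
--     # threatened by mines with x in [p-5, p+5], so each rabbit needs just 11
--     # dictionary lookups instead of a scan over all mines.
--     min_y = {}
--     for x, y in zip(Xm, Ym):
--         if x not in min_y or y < min_y[x]:
--             min_y[x] = y
--     deaths = {}
--     for p in position:
--         e = l
--         for x in range(p - 5, p + 6):
--             v = min_y.get(x)
--             if v is not None and v < e: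
--                 e = v
--         if e != l:
--             yd = 1 if e - 5 < 0 else e - 5
--         else:
--             yd = l
--         deaths[yd] = deaths.get(yd, 0) + 1
--     N = [N0]
--     d = [0]
--     run = N0
--     for i in range(l):
--         run -= deaths.get(i, 0)
--         N.append(run)
--         d.append(i + 1)
--     return (N, d)
-- ===== Notes on version B (the rewrite author's own statement) =====
-- stated objective: faster
-- what changed: B buckets mines once into a min-Ym-per-x dictionary and looks up only the 11 x-values of each rabbit's fixed-width window (instead of scanning every mine per rabbit), and tallies deaths in a dictionary instead of indexing a preallocated list.
import Mathlib
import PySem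

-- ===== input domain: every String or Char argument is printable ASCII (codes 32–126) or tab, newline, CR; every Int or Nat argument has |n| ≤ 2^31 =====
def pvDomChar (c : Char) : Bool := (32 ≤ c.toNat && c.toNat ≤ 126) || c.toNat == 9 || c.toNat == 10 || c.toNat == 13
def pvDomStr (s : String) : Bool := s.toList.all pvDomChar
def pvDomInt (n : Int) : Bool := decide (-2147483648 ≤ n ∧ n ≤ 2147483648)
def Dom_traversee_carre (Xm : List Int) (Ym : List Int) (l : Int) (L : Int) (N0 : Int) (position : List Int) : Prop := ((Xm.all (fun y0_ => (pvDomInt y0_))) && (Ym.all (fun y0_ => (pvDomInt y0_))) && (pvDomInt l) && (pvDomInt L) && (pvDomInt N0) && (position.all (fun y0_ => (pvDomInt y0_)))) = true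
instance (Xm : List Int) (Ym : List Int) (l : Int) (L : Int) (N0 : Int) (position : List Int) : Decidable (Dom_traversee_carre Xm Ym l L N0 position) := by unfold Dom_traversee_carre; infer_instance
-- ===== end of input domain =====

-- B replaces A's per-rabbit scan over all mines by a min-Ym-per-x dictionary built once
-- (only 11 lookups per rabbit) and a dictionary tally of deaths: objective = faster.

-- ===== PORT A =====
-- helper = Python's un_trajet_carre; Ym.getD i 0 : Ym[i], reached only in range under
-- Pre_ (out of range Python raises IndexError, which Pre_ excludes)
def unTrajetCarre (x0 : Int) (l : Int) (Xm : List Int) (Ym : List Int) : Int :=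
  let explosion := (List.range Xm.length).foldl (fun explosion i =>
    if Xm.getD i 0 - 5 ≤ x0 ∧ Xm.getD i 0 + 5 ≥ x0 then
      (if Ym.getD i 0 < explosion then Ym.getD i 0 else explosion)
    else explosion) l
  if explosion ≠ l then (if explosion - 5 < 0 then 1 else explosion - 5) else l

def traversee_carre (Xm : List Int) (Ym : List Int) (l : Int) (L : Int) (N0 : Int) (position : List Int) : List Int × List Int :=
  -- morts[y] += 1 : under Pre_, 0 ≤ y < len(morts); Python wraps/raises outside, excluded by Pre_
  let morts : List Int := List.replicate (l + 1).toNat 0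
  let morts := position.foldl (fun m p =>
    let y := unTrajetCarre p l Xm Ym
    m.modify y.toNat (· + 1)) morts
  -- N[-1] : N is never empty, so pyGet? returns
  (List.range l.toNat).foldl (fun (Nd : List Int × List Int) i =>
    (Nd.1 ++ [(PySem.List.pyGet? Nd.1 (-1)).getD 0 - morts.getD i 0], Nd.2 ++ [(i : Int) + 1]))
    ([N0], [0])

-- ===== PORT B =====
def traversee_carre_alt (Xm : List Int) (Ym : List Int) (l : Int) (L : Int) (N0 : Int) (position : List Int) : List Int × List Int :=
  let minY : PySem.Dict Int Int := (List.zip Xm Ym).foldl (fun d xy =>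
    match d.get? xy.1 with
    | none => d.insert xy.1 xy.2
    | some v => if xy.2 < v then d.insert xy.1 xy.2 else d) PySem.Dict.empty
  let deaths : PySem.Dict Int Int := position.foldl (fun dd p =>
    let e := (PySem.List.pyRange (p - 5) (p + 6) 1).foldl (fun e x =>
      match minY.get? x with
      | some v => if v < e then v else e
      | none => e) l
    let yd := if e ≠ l then (if e - 5 < 0 then 1 else e - 5) else l
    dd.insert yd (dd.getD yd 0 + 1)) PySem.Dict.empty
  let z := (List.range l.toNat).foldl (fun (s : Int × List Int × List Int) (i : Nat) =>
    let run := s.1 - deaths.getD (i : Int) 0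
    (run, s.2.1 ++ [run], s.2.2 ++ [(i : Int) + 1])) (N0, [N0], [0])
  (z.2.1, z.2.2)

-- ===== PRECONDITION & SPEC =====
-- Pre_ is exactly the set of inputs A returns on: excluded are only crashes —
-- IndexError Ym[i] when Ym is shorter than Xm and some rabbit's window reaches a
-- missing index, and IndexError morts[y] when l < 0 (morts empty) or l = 0 and some
-- rabbit triggers a mine with negative Ym (death index 1 in a length-1 list),
-- with at least one rabbit present.
def Pre_traversee_carre (Xm : List Int) (Ym : List Int) (l : Int) (L : Int) (N0 : Int) (position : List Int) : Prop :=
  (∀ p ∈ position, ∀ i ∈ List.range Xm.length, Ym.length ≤ i →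
      ¬ (Xm.getD i 0 - 5 ≤ p ∧ Xm.getD i 0 + 5 ≥ p)) ∧
  (position = [] ∨ 1 ≤ l ∨
    (l = 0 ∧ ∀ p ∈ position, ∀ xy ∈ List.zip Xm Ym,
      ¬ (xy.1 - 5 ≤ p ∧ p ≤ xy.1 + 5 ∧ xy.2 < 0)))
instance (Xm : List Int) (Ym : List Int) (l : Int) (L : Int) (N0 : Int) (position : List Int) : Decidable (Pre_traversee_carre Xm Ym l L N0 position) := by unfold Pre_traversee_carre; infer_instance

def pvWitness_traversee_carre : List Int × List Int × Int × Int × Int × List Int :=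
  ([0], [3], 5, 0, 10, [2])

def Spec_traversee_carre (Xm : List Int) (Ym : List Int) (l : Int) (L : Int) (N0 : Int) (position : List Int) (out : List Int × List Int) : Prop := out = traversee_carre_alt Xm Ym l L N0 position
instance (Xm : List Int) (Ym : List Int) (l : Int) (L : Int) (N0 : Int) (position : List Int) (out : List Int × List Int) : Decidable (Spec_traversee_carre Xm Ym l L N0 position out) := by unfold Spec_traversee_carre; infer_instance

-- ===== CLAIM (what is proved, stated in full; the proofs are below) =====
def Claim_equal_traversee_carre : Prop := ∀ (Xm : List Int) (Ym : List Int) (l : Int) (L : Int) (N0 : Int) (position : List Int), Dom_traversee_carre Xm Ym l L N0 position → Pre_traversee_carre Xm Ym l L N0 position → Spec_traversee_carre Xm Ym l L N0 position (traversee_carre Xm Ym l L N0 position)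

-- ===== LEMMAS AND PROOFS =====

-- the "window step" on a (x, y) mine pair, and the min over a pair list
def wstep (p : Int) (e : Int) (xy : Int × Int) : Int :=
  if xy.1 - 5 ≤ p ∧ xy.1 + 5 ≥ p then (if xy.2 < e then xy.2 else e) else e

def wmin (p l : Int) (pairs : List (Int × Int)) : Int := pairs.foldl (wstep p) l

-- B's option step
def bstep (e : Int) (o : Option Int) : Int :=
  match o with
  | some v => if v < e then v else e
  | none => e

-- B's min-per-x dictionary
def minDict (pairs : List (Int × Int)) : PySem.Dict Int Int :=
  pairs.foldl (fun d xy =>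
    match d.get? xy.1 with
    | none => d.insert xy.1 xy.2
    | some v => if xy.2 < v then d.insert xy.1 xy.2 else d) PySem.Dict.empty

lemma bstep_some (e v : Int) : bstep e (some v) = min e v := by
  simp [bstep, min_def]; split_ifs <;> omega

-- fold of bstep commutes with min at the start
lemma foldl_bstep_min (L : List Int) (g : Int → Option Int) (a b : Int) :
    L.foldl (fun e k => bstep e (g k)) (min a b) =
      min (L.foldl (fun e k => bstep e (g k)) a) b := by
  induction L generalizing a with
  | nil => simp
  | cons k L ih =>
    simp only [List.foldl_cons]
    have : bstep (min a b) (g k) = min (bstep a (g k)) b := by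
      cases g k with
      | none => simp [bstep]
      | some v => simp [bstep, min_def]; split_ifs <;> omega
    rw [this, ih]

-- result of the minDict step on get?
lemma get?_minStep (d : PySem.Dict Int Int) (x y k : Int) :
    (match d.get? x with
      | none => d.insert x y
      | some v => if y < v then d.insert x y else d).get? k =
      if k = x then some (match d.get? x with | none => y | some v => min v y) else d.get? k := by
  cases h : d.get? x with
  | none => simp [PySem.Dict.get?_insert]
  | some v =>
    by_cases hy : y < v
    · simp only [if_pos hy, PySem.Dict.get?_insert]
      split_ifs with hk
      · congr 1; simp only [min_def]; split_ifs <;> omega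
      · rfl
    · simp only [if_neg hy]
      split_ifs with hk
      · subst hk; rw [h]; congr 1; simp only [min_def]; split_ifs <;> omega
      · rfl

-- C-lemma: updating the lookup at a key inside a Nodup offset list mixes y in by min
lemma foldl_bstep_update_mem (offs : List Int) (g : Int → Option Int) (x y : Int)
    (hnd : offs.Nodup) (hx : x ∈ offs) : ∀ e : Int,
    offs.foldl (fun e k => bstep e (if k = x then
        some (match g x with | none => y | some v => min v y) else g k)) e =
      min (offs.foldl (fun e k => bstep e (g k)) e) y := by
  induction offs with
  | nil => cases hx
  | cons k offs ih =>
    intro e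
    have hknot : k ∉ offs := (List.nodup_cons.mp hnd).1
    have hnd' : offs.Nodup := (List.nodup_cons.mp hnd).2
    simp only [List.foldl_cons]
    rcases List.mem_cons.mp hx with hxk | hxm
    · subst hxk
      rw [if_pos rfl]
      rw [PySem.List.foldl_congr_mem offs _ (fun e k => bstep e (g k)) _
        (fun acc k' hk' => by
          have : k' ≠ x := fun h => hknot (h ▸ hk')
          simp [this])]
      cases h : g x with
      | none =>
        rw [bstep_some]
        simpa [bstep] using foldl_bstep_min offs g e y
      | some v =>
        rw [bstep_some, bstep_some, ← min_assoc, foldl_bstep_min]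
    · have hkx : k ≠ x := fun h => hknot (h ▸ hxm)
      rw [if_neg hkx]
      exact ih hnd' hxm _

lemma foldl_bstep_congr (offs : List Int) (g g' : Int → Option Int)
    (hg : ∀ k ∈ offs, g' k = g k) (e : Int) :
    offs.foldl (fun e k => bstep e (g' k)) e = offs.foldl (fun e k => bstep e (g k)) e := by
  apply PySem.List.foldl_congr_mem
  intro acc k hk
  rw [hg k hk]

lemma foldl_bstep_none (offs : List Int) (e : Int) :
    offs.foldl (fun e k => bstep e (none : Option Int)) e = e := by
  induction offs generalizing e with
  | nil => rfl
  | cons k offs ih => simp only [List.foldl_cons, bstep]; exact ih e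

-- B1: B's 11-lookup fold over the dict equals the direct window min over the pairs
lemma offFold_eq_wmin (pairs : List (Int × Int)) (p l : Int) :
    (PySem.List.pyRange (p - 5) (p + 6) 1).foldl
        (fun e x => bstep e ((minDict pairs).get? x)) l = wmin p l pairs := by
  induction pairs using List.reverseRecOn with
  | nil =>
    rw [foldl_bstep_congr _ (fun _ => (none : Option Int)) _
      (fun k _ => by simp [minDict, PySem.Dict.get?_empty])]
    exact foldl_bstep_none _ l
  | append_singleton pairs q ih =>
    have hstep : minDict (pairs ++ [q]) =
        (match (minDict pairs).get? q.1 with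
          | none => (minDict pairs).insert q.1 q.2
          | some v => if q.2 < v then (minDict pairs).insert q.1 q.2 else minDict pairs) := by
      simp [minDict, List.foldl_append]
    have hwm : wmin p l (pairs ++ [q]) = wstep p (wmin p l pairs) q := by
      simp [wmin, List.foldl_append]
    rw [hwm, hstep]
    rw [foldl_bstep_congr _
      (fun k => if k = q.1 then
        some (match (minDict pairs).get? q.1 with | none => q.2 | some v => min v q.2)
        else (minDict pairs).get? k) _
      (fun k _ => get?_minStep (minDict pairs) q.1 q.2 k)]
    by_cases hw : q.1 - 5 ≤ p ∧ q.1 + 5 ≥ p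
    · rw [foldl_bstep_update_mem _ _ _ _ (PySem.List.nodup_pyRange_one _ _)
        (PySem.List.mem_pyRange_one.mpr ⟨by omega, by omega⟩) l, ih]
      unfold wstep
      rw [if_pos hw]
      simp only [min_def]
      split_ifs <;> omega
    · have hnm : q.1 ∉ PySem.List.pyRange (p - 5) (p + 6) 1 := by
        intro hmem
        rcases PySem.List.mem_pyRange_one.mp hmem with ⟨h1, h2⟩
        omega
      rw [foldl_bstep_congr _ (fun k => (minDict pairs).get? k) _
        (fun k hk => by
          have : k ≠ q.1 := fun h => hnm (h ▸ hk)
          simp [this]), ih]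
      unfold wstep
      rw [if_neg hw]

-- A1: A's index fold equals the window min over the zipped pairs, given the tail condition
lemma rangeFold_eq_wmin (Xm Ym : List Int) (p e : Int)
    (htail : ∀ i, Ym.length ≤ i → i < Xm.length →
      ¬ (Xm.getD i 0 - 5 ≤ p ∧ Xm.getD i 0 + 5 ≥ p)) :
    (List.range Xm.length).foldl (fun explosion i =>
      if Xm.getD i 0 - 5 ≤ p ∧ Xm.getD i 0 + 5 ≥ p then
        (if Ym.getD i 0 < explosion then Ym.getD i 0 else explosion)
      else explosion) e = (List.zip Xm Ym).foldl (wstep p) e := by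
  induction Xm generalizing Ym e with
  | nil => simp
  | cons x Xm ih =>
    rw [List.length_cons, List.range_succ_eq_map, List.foldl_cons, List.foldl_map]
    cases Ym with
    | nil =>
      have h0 : ¬ (x - 5 ≤ p ∧ x + 5 ≥ p) := by
        have := htail 0 (by simp) (by simp)
        simpa using this
      simp only [List.getD_cons_zero, if_neg h0]
      rw [PySem.List.foldl_congr_mem _ _ (fun e i =>
        if Xm.getD i 0 - 5 ≤ p ∧ Xm.getD i 0 + 5 ≥ p then
          (if ([] : List Int).getD i 0 < e then ([] : List Int).getD i 0 else e)
        else e) _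
        (fun acc i _ => by simp)]
      rw [ih [] _ (fun i h1 h2 => by
        have := htail (i + 1) (by simp) (by simpa using h2)
        simpa using this)]
      simp
    | cons y Ym =>
      simp only [List.getD_cons_zero]
      rw [PySem.List.foldl_congr_mem _ _ (fun e i =>
        if Xm.getD i 0 - 5 ≤ p ∧ Xm.getD i 0 + 5 ≥ p then
          (if Ym.getD i 0 < e then Ym.getD i 0 else e)
        else e) _
        (fun acc i _ => by simp)]
      rw [ih Ym _ (fun i h1 h2 => by
        have := htail (i + 1) (by simpa using h1) (by simpa using h2)
        simpa using this)]
      rfl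

-- wmin never exceeds its base
lemma wmin_le (p : Int) (pairs : List (Int × Int)) : ∀ e, pairs.foldl (wstep p) e ≤ e := by
  induction pairs with
  | nil => simp
  | cons q pairs ih =>
    intro e
    simp only [List.foldl_cons]
    calc pairs.foldl (wstep p) (wstep p e q) ≤ wstep p e q := ih _
      _ ≤ e := by unfold wstep; split_ifs <;> omega

-- with base 0 and no triggering mine, wmin stays 0
lemma wmin_zero (p : Int) (pairs : List (Int × Int))
    (h : ∀ xy ∈ pairs, ¬ (xy.1 - 5 ≤ p ∧ p ≤ xy.1 + 5 ∧ xy.2 < 0)) :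
    pairs.foldl (wstep p) 0 = 0 := by
  induction pairs with
  | nil => rfl
  | cons q pairs ih =>
    simp only [List.foldl_cons]
    have hq := h q (by simp)
    have : wstep p 0 q = 0 := by unfold wstep; split_ifs <;> omega
    rw [this]; exact ih (fun xy hxy => h xy (by simp [hxy]))

-- the tally lemma for A's morts list
lemma morts_count (ys : List Int) (i : Nat) : ∀ m : List Int,
    (∀ y ∈ ys, 0 ≤ y ∧ y.toNat < m.length) →
    (ys.foldl (fun m y => m.modify y.toNat (· + 1)) m).getD i 0 =
      m.getD i 0 + ys.count (i : Int) := by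
  induction ys with
  | nil => intro m _; simp
  | cons y ys ih =>
    intro m hb
    obtain ⟨hy0, hylt⟩ := hb y (List.mem_cons_self ..)
    simp only [List.foldl_cons]
    rw [ih (m.modify y.toNat (· + 1)) (fun y' hy' => by
      have h := hb y' (List.mem_cons_of_mem _ hy')
      simpa [List.length_modify] using h)]
    have hm : (m.modify y.toNat (· + 1)).getD i 0 =
        if y.toNat = i then m.getD i 0 + 1 else m.getD i 0 := by
      rw [List.getD_eq_getElem?_getD, List.getElem?_modify]
      cases h : m[i]? with
      | none =>
        have : m.length ≤ i := by
          by_contra hlt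
          exact absurd h (by simp; omega)
        have : y.toNat ≠ i := by omega
        simp [this, List.getD_eq_getElem?_getD, h]
      | some a =>
        simp only [Option.map_eq_map, Option.map_some, Option.getD_some]
        rw [List.getD_eq_getElem?_getD, h]
        split_ifs <;> rfl
    rw [hm, List.count_cons]
    split_ifs with h1 <;> simp [beq_iff_eq] at * <;> omega

-- N[-1] of a list ending in a
lemma pyGet?_neg_one_append (N : List Int) (a : Int) :
    PySem.List.pyGet? (N ++ [a]) (-1) = some a := by
  simp [PySem.List.pyGet?, PySem.List.pyIdx?]

-- the final fold: A's (N, d) pair fold equals B's (run, N, d) triple fold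
lemma final_fold (cA : Nat → Int) (cB : Int → Int) :
    ∀ r : List Nat, (∀ i ∈ r, cA i = cB (i : Int)) →
    ∀ (N d : List Int) (run : Int), PySem.List.pyGet? N (-1) = some run →
    r.foldl (fun (Nd : List Int × List Int) i =>
      (Nd.1 ++ [(PySem.List.pyGet? Nd.1 (-1)).getD 0 - cA i], Nd.2 ++ [(i : Int) + 1])) (N, d) =
    (fun z : Int × List Int × List Int => (z.2.1, z.2.2))
      (r.foldl (fun (s : Int × List Int × List Int) (i : Nat) =>
        let run := s.1 - cB (i : Int)
        (run, s.2.1 ++ [run], s.2.2 ++ [(i : Int) + 1])) (run, N, d)) := by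
  intro r
  induction r with
  | nil => intro _ N d run _; rfl
  | cons i r ih =>
    intro hc N d run h
    simp only [List.foldl_cons, h, Option.getD_some, hc i (List.mem_cons_self ..)]
    exact ih (fun j hj => hc j (List.mem_cons_of_mem _ hj)) _ _ _
      (pyGet?_neg_one_append N (run - cB (i : Int)))

-- the death-distance as a function of the window minimum
def fateOf (l E : Int) : Int := if E ≠ l then (if E - 5 < 0 then 1 else E - 5) else l

lemma main_eq (Xm Ym : List Int) (l L N0 : Int) (position : List Int)
    (hpre : Pre_traversee_carre Xm Ym l L N0 position) :
    traversee_carre Xm Ym l L N0 position = traversee_carre_alt Xm Ym l L N0 position := by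
  obtain ⟨htail, hbr⟩ := hpre
  have hfate : ∀ p ∈ position, unTrajetCarre p l Xm Ym = fateOf l (wmin p l (Xm.zip Ym)) := by
    intro p hp
    unfold unTrajetCarre fateOf
    rw [rangeFold_eq_wmin Xm Ym p l
      (fun i h1 h2 => htail p hp i (List.mem_range.mpr h2) h1)]
    rfl
  -- the common per-rabbit death distance
  set f : Int → Int := fun p => fateOf l (wmin p l (Xm.zip Ym)) with hf
  set ys : List Int := position.map f with hys
  -- bounds on f within Pre_
  have hbnd : ∀ y ∈ ys, 0 ≤ y ∧ y.toNat < (l + 1).toNat := by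
    intro y hy
    rcases List.mem_map.mp hy with ⟨p, hp, rfl⟩
    have hE : wmin p l (Xm.zip Ym) ≤ l := wmin_le p (Xm.zip Ym) l
    rcases hbr with hemp | hl | ⟨hl0, hnt⟩
    · subst hemp; cases hp
    · simp only [hf, fateOf]
      split_ifs <;> constructor <;> omega
    · have h0 : (Xm.zip Ym).foldl (wstep p) 0 = 0 :=
        wmin_zero p (Xm.zip Ym) (fun xy hxy h => hnt p hp xy hxy h)
      simp only [hf, fateOf, wmin, hl0, h0]
      norm_num
  -- A's tally = B's tally, read at every index of the final loop
  have hc : ∀ i ∈ List.range l.toNat,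
      (position.foldl (fun m p => m.modify (unTrajetCarre p l Xm Ym).toNat (· + 1))
        (List.replicate (l + 1).toNat (0 : Int))).getD i 0 =
      (position.foldl (fun dd p =>
        dd.insert (f p) (dd.getD (f p) 0 + 1)) PySem.Dict.empty).getD (i : Int) 0 := by
    intro i hi
    have hiA : position.foldl (fun m p => m.modify (unTrajetCarre p l Xm Ym).toNat (· + 1))
        (List.replicate (l + 1).toNat (0 : Int)) =
        ys.foldl (fun m y => m.modify y.toNat (· + 1)) (List.replicate (l + 1).toNat (0 : Int)) := by
      rw [hys, List.foldl_map]
      exact (PySem.List.foldl_congr_mem _ _ _ _ (fun m p hp => by rw [hfate p hp])).symm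
    have hiB : position.foldl (fun dd p => dd.insert (f p) (dd.getD (f p) 0 + 1))
        (PySem.Dict.empty : PySem.Dict Int Int) =
        ys.foldl (fun dd y => dd.insert y (dd.getD y 0 + 1)) PySem.Dict.empty := by
      rw [hys, List.foldl_map]
    rw [hiA]
    rw [hiB]
    rw [morts_count ys i (List.replicate (l + 1).toNat (0 : Int))
      (by
        intro y hy
        obtain ⟨h1, h2⟩ := hbnd y hy
        refine ⟨h1, ?_⟩
        rw [List.length_replicate]
        exact h2),
      PySem.Dict.getD_foldl_insert_add_one, PySem.Dict.getD_empty]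
    have hlt : i < (l + 1).toNat := by
      have := List.mem_range.mp hi; omega
    simp [List.getD_eq_getElem?_getD, hlt]
  -- assemble
  simp only [traversee_carre, traversee_carre_alt]
  have hminD : (List.zip Xm Ym).foldl (fun d xy =>
      match d.get? xy.1 with
      | none => d.insert xy.1 xy.2
      | some v => if xy.2 < v then d.insert xy.1 xy.2 else d) PySem.Dict.empty =
      minDict (Xm.zip Ym) := rfl
  rw [hminD]
  have hBbody : ∀ (dd : PySem.Dict Int Int), ∀ p ∈ position,
      (fun (dd : PySem.Dict Int Int) p =>
        let e := (PySem.List.pyRange (p - 5) (p + 6) 1).foldl (fun e x =>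
          match (minDict (Xm.zip Ym)).get? x with
          | some v => if v < e then v else e
          | none => e) l
        let yd := if e ≠ l then (if e - 5 < 0 then 1 else e - 5) else l
        dd.insert yd (dd.getD yd 0 + 1)) dd p =
      dd.insert (f p) (dd.getD (f p) 0 + 1) := by
    intro dd p _
    show (fun e => (fun yd => dd.insert yd (dd.getD yd 0 + 1))
        (if e ≠ l then (if e - 5 < 0 then 1 else e - 5) else l))
      ((PySem.List.pyRange (p - 5) (p + 6) 1).foldl
        (fun e x => bstep e ((minDict (Xm.zip Ym)).get? x)) l) = _
    rw [offFold_eq_wmin]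
    rfl
  rw [PySem.List.foldl_congr_mem position _
    (fun dd p => dd.insert (f p) (dd.getD (f p) 0 + 1)) _ (fun dd p hp => hBbody dd p hp)]
  have hstart : PySem.List.pyGet? [N0] (-1) = some N0 := by
    simpa using pyGet?_neg_one_append [] N0
  have := final_fold
    (fun i => (position.foldl (fun m p =>
      m.modify (unTrajetCarre p l Xm Ym).toNat (· + 1))
      (List.replicate (l + 1).toNat (0 : Int))).getD i 0)
    (fun j => (position.foldl (fun dd p =>
      dd.insert (f p) (dd.getD (f p) 0 + 1)) PySem.Dict.empty).getD j 0)
    (List.range l.toNat) hc [N0] [0] N0 hstart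
  exact this

-- ===== VERDICT (by name: the statement is the Claim_ definition above) =====
theorem traversee_carre_spec : Claim_equal_traversee_carre := by
  intro Xm Ym l L N0 position _ hpre
  exact main_eq Xm Ym l L N0 position hpre
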